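-- pv_equiv track=rewrite | github.com/dadezeeuw/smps-events | scrape_events.py | clean_event_segment
-- ===== SOURCE A (Python) =====
-- skip_lines = {
--     "Register Now",
--     "Read More",
--     "View Details",
--     "View Details \u25ba",
--     "Venue website",
--     "View Current Registrants",
-- }
--
-- footer_lines = {
--     "Connect",
--     "Follow us",
--     "Signup for our Newsletter",
--     "Join Our Mailing List",
--     "Additional Event Information",
-- }
--
-- def clean_event_segment(segment):
--     cleaned = []
--
--     for line in segment:
--         if line in footer_lines:
--             break
--
--         if line in skip_lines:
--             continue
--
--         cleaned.append(line)
--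
--     return cleaned
-- ===== SOURCE B (Python) =====
-- skip_lines = {
--     "Register Now",
--     "Read More",
--     "View Details",
--     "View Details \u25ba",
--     "Venue website",
--     "View Current Registrants",
-- }
--
-- footer_lines = {
--     "Connect",
--     "Follow us",
--     "Signup for our Newsletter",
--     "Join Our Mailing List",
--     "Additional Event Information",
-- }
--
-- def clean_event_segment(segment):
--     # Right-to-left fold: a footer line resets (discards) the accumulator,
--     # since everything accumulated so far lies after that footer line; after
--     # the full pass only the filtered prefix before the FIRST footer remains
--     # (collected in reverse, so reverse it once at the end).
--     out = []
--     for line in reversed(segment):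
--         if line in footer_lines:
--             out = []
--         elif line not in skip_lines:
--             out.append(line)
--     out.reverse()
--     return out
-- ===== Notes on version B (the rewrite author's own statement) =====
-- stated objective: alternative
-- what changed: Replaced A's left-to-right break/continue loop by a right-to-left fold in which a footer line resets the accumulator to empty (discarding everything after the first footer) and non-skip lines are prepended; no break or truncation step exists.
import Mathlib
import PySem

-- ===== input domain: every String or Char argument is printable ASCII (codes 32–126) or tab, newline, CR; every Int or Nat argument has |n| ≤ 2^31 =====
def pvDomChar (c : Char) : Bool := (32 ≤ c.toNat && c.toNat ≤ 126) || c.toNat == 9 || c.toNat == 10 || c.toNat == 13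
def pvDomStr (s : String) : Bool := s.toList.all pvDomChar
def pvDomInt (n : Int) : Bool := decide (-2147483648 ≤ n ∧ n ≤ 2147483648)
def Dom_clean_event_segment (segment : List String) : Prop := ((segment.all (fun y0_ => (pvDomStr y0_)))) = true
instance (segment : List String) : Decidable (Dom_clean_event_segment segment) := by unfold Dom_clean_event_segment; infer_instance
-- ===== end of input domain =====

-- B replaces A's left-to-right break/continue loop by a right-to-left fold whose
-- accumulator is reset to [] by a footer line; same return value, different traversal.

-- shared module-level constants (sets of strings)
def skip_lines : PySem.Set String := PySem.Set.ofList
  ["Register Now", "Read More", "View Details", "View Details ►",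
   "Venue website", "View Current Registrants"]

def footer_lines : PySem.Set String := PySem.Set.ofList
  ["Connect", "Follow us", "Signup for our Newsletter",
   "Join Our Mailing List", "Additional Event Information"]

-- ===== PORT A =====
-- A: one forward loop with break on footer lines, continue on skip lines, append otherwise.
def cleanLoopA : List String → List String → List String
  | acc, [] => acc
  | acc, line :: rest =>
    if footer_lines.contains line then acc
    else if skip_lines.contains line then cleanLoopA acc rest
    else cleanLoopA (acc ++ [line]) rest

def clean_event_segment (segment : List String) : List String :=
  cleanLoopA [] segment

-- ===== PORT B =====
-- B: loop over reversed(segment); footer resets the accumulator, non-skip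
-- lines are appended; final reverse.
def clean_event_segment_alt (segment : List String) : List String :=
  (segment.reverse.foldl
    (fun out line =>
      if footer_lines.contains line then []
      else if skip_lines.contains line then out
      else out ++ [line])
    []).reverse

-- ===== PRECONDITION & SPEC =====
def Spec_clean_event_segment (segment : List String) (out : List String) : Prop := out = clean_event_segment_alt segment
instance (segment : List String) (out : List String) : Decidable (Spec_clean_event_segment segment out) := by unfold Spec_clean_event_segment; infer_instance

-- ===== CLAIM (what is proved, stated in full; the proofs are below) =====
def Claim_equal_clean_event_segment : Prop := ∀ (segment : List String), Dom_clean_event_segment segment → Spec_clean_event_segment segment (clean_event_segment segment)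

-- ===== LEMMAS AND PROOFS =====

theorem cleanLoopA_eq (segment : List String) : ∀ acc : List String,
    cleanLoopA acc segment = acc ++ clean_event_segment_alt segment := by
  induction segment with
  | nil => intro acc; simp [cleanLoopA, clean_event_segment_alt]
  | cons line rest ih =>
    intro acc
    by_cases hf : line ∈ footer_lines
    · simp [cleanLoopA, clean_event_segment_alt, hf]
    · by_cases hs : line ∈ skip_lines
      · simp [cleanLoopA, clean_event_segment_alt, hf, hs, ih acc]
      · simp [cleanLoopA, clean_event_segment_alt, hf, hs, ih (acc ++ [line])]

-- ===== VERDICT (by name: the statement is the Claim_ definition above) =====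
theorem clean_event_segment_spec : Claim_equal_clean_event_segment := by
  intro segment _
  unfold Spec_clean_event_segment clean_event_segment
  simpa using cleanLoopA_eq segment []
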